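-- pv_equiv track=rewrite | github.com/NkosiSampson/UTA-DSA | Hw1Final/myfriends.py | find_all_number_of_friends
-- ===== SOURCE A (Python) =====
-- def find_all_number_of_friends(my_dir):
--     """List every person in the directory by the number of friends each has
--
--     Returns a sorted (in decreasing order by number of friends) list
--     of 2-tuples, where each tuples has the person's name as the first element,
--     the number of friends as the second element.
--     """
--     friends_list = []
--
--     # ------------ BEGIN YOUR CODE ------------
--
--     from operator import itemgetter
--     for name in my_dir.keys():
--         duple = []
--         duple.append(name)
--         numfriends = len(my_dir[name])
--         duple.append(numfriends)
--         friends_list.append(tuple(duple))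
--         friends_list = sorted(friends_list, key=itemgetter(1), reverse=True)
--         friends_list = sorted(friends_list, key=itemgetter(0))
--
--
--     # ------------ END YOUR CODE ------------
--
--     return friends_list
-- ===== SOURCE B (Python) =====
-- def find_all_number_of_friends(my_dir):
--     """List every person with their friend count, sorted by name ascending.
--
--     One pass to build the (name, count) list, then a single sort by name,
--     instead of re-sorting the whole list twice on every iteration.
--     """
--     return sorted(((name, len(friends)) for name, friends in my_dir.items()),
--                   key=lambda t: t[0])
-- ===== Notes on version B (the rewrite author's own statement) =====
-- stated objective: faster
-- what changed: Build the (name, count) list in one pass over items() and sort once by name, instead of re-sorting the whole accumulated list twice (by count desc, then by name) inside the loop.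
import Mathlib
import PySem

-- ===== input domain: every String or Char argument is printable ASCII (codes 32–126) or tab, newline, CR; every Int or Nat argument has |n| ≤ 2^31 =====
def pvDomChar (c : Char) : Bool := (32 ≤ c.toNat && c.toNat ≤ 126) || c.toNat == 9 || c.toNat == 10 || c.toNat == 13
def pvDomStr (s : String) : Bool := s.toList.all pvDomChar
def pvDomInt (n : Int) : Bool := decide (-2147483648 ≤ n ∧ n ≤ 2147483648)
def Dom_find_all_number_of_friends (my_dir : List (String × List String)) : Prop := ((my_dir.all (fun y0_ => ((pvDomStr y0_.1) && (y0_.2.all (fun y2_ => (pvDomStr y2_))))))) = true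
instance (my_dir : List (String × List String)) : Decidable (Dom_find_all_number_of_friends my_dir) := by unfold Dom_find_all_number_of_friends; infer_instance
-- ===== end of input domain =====

-- B builds the (name, count) list in one pass and sorts once by name; A re-sorts the whole list twice per iteration.


-- ===== PORT A =====
-- for name in my_dir.keys(): append (name, len(my_dir[name])); re-sort by count desc, then by name asc.
-- my_dir[name] is ported as getD name []: name ranges over the dict's keys, so the KeyError branch is unreachable and getD is exact.
def find_all_number_of_friends (my_dir : List (String × List String)) : List (String × Int) :=
  let d := PySem.Dict.ofList my_dir
  d.keys.foldl
    (fun friends_list name =>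
      let duple : String × Int := (name, ((d.getD name []).length : Int))
      PySem.List.sorted
        (PySem.List.sorted (friends_list ++ [duple]) (fun t => t.2) true)
        (fun t => t.1) false)
    []

-- ===== PORT B =====
def find_all_number_of_friends_alt (my_dir : List (String × List String)) : List (String × Int) :=
  PySem.List.sorted
    ((PySem.Dict.ofList my_dir).items.map (fun p => (p.1, (p.2.length : Int))))
    (fun t => t.1) false

-- ===== PRECONDITION & SPEC =====
def Spec_find_all_number_of_friends (my_dir : List (String × List String)) (out : List (String × Int)) : Prop := out = find_all_number_of_friends_alt my_dir
instance (my_dir : List (String × List String)) (out : List (String × Int)) : Decidable (Spec_find_all_number_of_friends my_dir out) := by unfold Spec_find_all_number_of_friends; infer_instance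

-- ===== CLAIM (what is proved, stated in full; the proofs are below) =====
def Claim_equal_find_all_number_of_friends : Prop := ∀ (my_dir : List (String × List String)), Dom_find_all_number_of_friends my_dir → Spec_find_all_number_of_friends my_dir (find_all_number_of_friends my_dir)

-- ===== LEMMAS AND PROOFS =====

-- a list pairwise ≤ on an injectively-distinct key is pairwise <
theorem pv_pairwise_lt_of_le_of_nodup (l : List (String × Int))
    (hle : l.Pairwise (fun a b => a.1 ≤ b.1)) (hnd : (l.map (·.1)).Nodup) :
    l.Pairwise (fun a b => a.1 < b.1) := by
  have hne : l.Pairwise (fun a b => a.1 ≠ b.1) := (List.pairwise_map).1 hnd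
  exact (hle.and hne).imp (fun h => lt_of_le_of_ne h.1 h.2)

-- the loop invariant: starting from a strictly name-sorted accumulator whose names
-- together with the remaining keys are all distinct, A's loop returns a strictly
-- name-sorted permutation of acc ++ (remaining keys mapped to their counts)
theorem pv_loop_invariant (n : String → Int) :
    ∀ (ks : List String) (acc : List (String × Int)),
      ((acc.map (·.1)) ++ ks).Nodup →
      acc.Pairwise (fun a b => a.1 < b.1) →
      (ks.foldl
        (fun friends_list name =>
          PySem.List.sorted
            (PySem.List.sorted (friends_list ++ [(name, n name)]) (fun t => t.2) true)
            (fun t => t.1) false)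
        acc).Perm (acc ++ ks.map (fun k => (k, n k))) ∧
      (ks.foldl
        (fun friends_list name =>
          PySem.List.sorted
            (PySem.List.sorted (friends_list ++ [(name, n name)]) (fun t => t.2) true)
            (fun t => t.1) false)
        acc).Pairwise (fun a b => a.1 < b.1) := by
  intro ks
  induction ks with
  | nil => intro acc _ hp; simpa using hp
  | cons k ks ih =>
    intro acc hnd hp
    simp only [List.foldl_cons]
    set acc' := PySem.List.sorted
        (PySem.List.sorted (acc ++ [(k, n k)]) (fun t => t.2) true)
        (fun t => t.1) false with hacc'
    have hperm : acc'.Perm (acc ++ [(k, n k)]) :=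
      (PySem.List.sorted_perm _ _ _).trans (PySem.List.sorted_perm _ _ _)
    have hmapperm : (acc'.map (·.1)).Perm ((acc.map (·.1)) ++ [k]) := by
      simpa using hperm.map (·.1)
    have hnd' : ((acc'.map (·.1)) ++ ks).Nodup := by
      refine (List.Perm.nodup_iff (hmapperm.append_right ks)).2 ?_
      simpa [List.append_assoc] using hnd
    have hp' : acc'.Pairwise (fun a b => a.1 < b.1) := by
      refine pv_pairwise_lt_of_le_of_nodup _ (PySem.List.sorted_pairwise _ _) ?_
      exact (List.Nodup.of_append_left hnd')
    obtain ⟨hP, hS⟩ := ih acc' hnd' hp'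
    refine ⟨hP.trans ?_, hS⟩
    have heq : (acc ++ [(k, n k)]) ++ ks.map (fun k => (k, n k))
        = acc ++ (k :: ks).map (fun k => (k, n k)) := by simp
    exact heq ▸ hperm.append_right _

theorem find_all_number_of_friends_spec : Claim_equal_find_all_number_of_friends := by
  intro my_dir _
  unfold Spec_find_all_number_of_friends find_all_number_of_friends find_all_number_of_friends_alt
  set d := PySem.Dict.ofList my_dir with hd
  have hnd : d.keys.Nodup := PySem.Dict.nodup_keys_ofList my_dir
  obtain ⟨hP, hS⟩ := pv_loop_invariant (fun k => ((d.getD k []).length : Int)) d.keys [] (by simpa using hnd) (by simp)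
  have hitems : d.items.map (fun p => (p.1, (p.2.length : Int)))
      = d.keys.map (fun k => (k, ((d.getD k []).length : Int))) := by
    rw [PySem.Dict.items_eq_map_keys d hnd []]
    simp
  rw [hitems]
  exact (PySem.List.sorted_eq_of_perm_of_pairwise_lt _ _ _ (by simpa using hP) hS).symm
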